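-- pv_equiv track=rewrite | github.com/solitasroh/ghostwin | scripts/tests/calibration.py | _find_bands
-- ===== SOURCE A (Python) =====
-- def _find_bands(indices):
--     """Find contiguous bands in a sorted array of indices.
--
--     Returns list of (start, end) tuples.
--     """
--     if len(indices) == 0:
--         return []
--     bands = []
--     start = indices[0]
--     prev = indices[0]
--     for idx in indices[1:]:
--         if idx - prev > 2:  # gap > 2 pixels = new band
--             bands.append((int(start), int(prev)))
--             start = idx
--         prev = idx
--     bands.append((int(start), int(prev)))
--     return bands
-- ===== SOURCE B (Python) =====
-- def _find_bands(indices):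
--     """Find contiguous bands in a sorted array of indices.
--
--     Returns list of (start, end) tuples.
--     """
--     idx = list(indices)
--     if not idx:
--         return []
--     starts = [idx[0]] + [b for a, b in zip(idx, idx[1:]) if b - a > 2]
--     ends = [a for a, b in zip(idx, idx[1:]) if b - a > 2] + [idx[-1]]
--     return [(int(s), int(e)) for s, e in zip(starts, ends)]
-- ===== Notes on version B (the rewrite author's own statement) =====
-- stated objective: alternative
-- what changed: Replaces the stateful accumulate-and-flush loop (carrying start/prev and appending a band at each gap and after the loop) with two independent boundary comprehensions over adjacent pairs (band starts and band ends) that are zipped at the end.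
import Mathlib
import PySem

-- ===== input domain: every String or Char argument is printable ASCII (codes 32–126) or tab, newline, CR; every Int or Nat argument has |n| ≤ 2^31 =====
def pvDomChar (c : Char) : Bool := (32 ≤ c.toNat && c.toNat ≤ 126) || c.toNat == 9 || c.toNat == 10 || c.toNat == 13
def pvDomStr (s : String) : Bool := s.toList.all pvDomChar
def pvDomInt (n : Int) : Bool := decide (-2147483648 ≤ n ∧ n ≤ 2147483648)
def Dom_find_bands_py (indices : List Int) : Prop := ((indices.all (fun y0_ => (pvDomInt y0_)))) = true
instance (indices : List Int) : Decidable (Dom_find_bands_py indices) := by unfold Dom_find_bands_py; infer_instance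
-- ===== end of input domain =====

-- B replaces A's stateful accumulate-and-flush loop by two independent boundary
-- computations (band starts / band ends over adjacent pairs) zipped at the end;
-- objective: alternative decomposition, same cost.

-- ===== PORT A =====
-- the for-loop of A, state = (bands, start, prev)
def findBandsLoopA (rest : List Int) (bands : List (Int × Int)) (start prev : Int) :
    List (Int × Int) :=
  match rest with
  | [] => bands ++ [(start, prev)]          -- trailing bands.append((int(start), int(prev)))
  | idx :: r =>
    if idx - prev > 2 then
      findBandsLoopA r (bands ++ [(start, prev)]) idx idx
    else
      findBandsLoopA r bands start idx

def find_bands_py (indices : List Int) : List (Int × Int) :=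
  match indices with
  | [] => []
  | x :: xs => findBandsLoopA xs [] x x     -- start = prev = indices[0]; loop over indices[1:]

-- ===== PORT B =====
def find_bands_py_alt (indices : List Int) : List (Int × Int) :=
  match indices with
  | [] => []
  | x :: xs =>
    let prs := List.zip (x :: xs) xs        -- zip(idx, idx[1:])
    let starts := x :: (prs.filter (fun p => decide (p.2 - p.1 > 2))).map Prod.snd
    let ends := (prs.filter (fun p => decide (p.2 - p.1 > 2))).map Prod.fst
                  ++ [xs.getLastD x]        -- idx[-1] (list nonempty)
    List.zip starts ends

-- ===== PRECONDITION & SPEC =====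
def Spec_find_bands_py (indices : List Int) (out : List (Int × Int)) : Prop := out = find_bands_py_alt indices
instance (indices : List Int) (out : List (Int × Int)) : Decidable (Spec_find_bands_py indices out) := by unfold Spec_find_bands_py; infer_instance

-- ===== CLAIM (what is proved, stated in full; the proofs are below) =====
def Claim_equal_find_bands_py : Prop := ∀ (indices : List Int), Dom_find_bands_py indices → Spec_find_bands_py indices (find_bands_py indices)

-- ===== LEMMAS AND PROOFS =====

-- A's loop produces exactly: accumulated bands, then starts zipped with ends.
theorem findBandsLoopA_eq (xs : List Int) :
    ∀ (bands : List (Int × Int)) (start prev : Int),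
      findBandsLoopA xs bands start prev =
        bands ++
          List.zip
            (start :: ((List.zip (prev :: xs) xs).filter
                (fun p => decide (p.2 - p.1 > 2))).map Prod.snd)
            (((List.zip (prev :: xs) xs).filter
                (fun p => decide (p.2 - p.1 > 2))).map Prod.fst ++ [xs.getLastD prev]) := by
  induction xs with
  | nil =>
    intro bands start prev
    simp [findBandsLoopA]
  | cons y ys ih =>
    intro bands start prev
    by_cases h : y - prev > 2
    · simp only [findBandsLoopA, if_pos h, ih, List.zip_cons_cons, List.filter_cons,
        decide_eq_true h, List.getLastD_cons, List.append_assoc]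
      simp [List.zip]
    · simp only [findBandsLoopA, if_neg h, ih, List.zip_cons_cons, List.filter_cons,
        decide_eq_false h, List.getLastD_cons]
      simp

-- ===== VERDICT (by name: the statement is the Claim_ definition above) =====
theorem find_bands_py_spec : Claim_equal_find_bands_py := by
  intro indices _
  unfold Spec_find_bands_py
  cases indices with
  | nil => rfl
  | cons x xs =>
    simp [find_bands_py, find_bands_py_alt, findBandsLoopA_eq]
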